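-- pv_equiv track=rewrite | github.com/omochibuster/project_euler | 41-50/44_Pentagon_numbers/main.py | gen_divisors
-- ===== SOURCE A (Python) =====
-- def gen_divisors(f, k = 0):
--     if k == len(f):
--         yield 1, 1
--     else:
--         p, e0 = f[k]
--         for d1, d2 in gen_divisors(f, k + 1):
--             for e in range(e0 + 1):
--                 yield d1 * p ** e, d2 * p ** (e0 - e)
-- ===== SOURCE B (Python) =====
-- def gen_divisors(f, k=0):
--     acc = [(1, 1)]
--     for i in range(len(f) - 1, k - 1, -1):
--         p, e0 = f[i]
--         acc = [(d1 * p ** e, d2 * p ** (e0 - e))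
--                for d1, d2 in acc
--                for e in range(e0 + 1)]
--     yield from acc
-- ===== Notes on version B (the rewrite author's own statement) =====
-- stated objective: alternative
-- what changed: Replaces the nested-generator recursion by an iterative product accumulator: start from the singleton trivial-pair accumulator and fold the factors f[len-1] down to f[k] into the pair list with one comprehension per factor, then yield the final list; no recursion and no generator chain.
import Mathlib
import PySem

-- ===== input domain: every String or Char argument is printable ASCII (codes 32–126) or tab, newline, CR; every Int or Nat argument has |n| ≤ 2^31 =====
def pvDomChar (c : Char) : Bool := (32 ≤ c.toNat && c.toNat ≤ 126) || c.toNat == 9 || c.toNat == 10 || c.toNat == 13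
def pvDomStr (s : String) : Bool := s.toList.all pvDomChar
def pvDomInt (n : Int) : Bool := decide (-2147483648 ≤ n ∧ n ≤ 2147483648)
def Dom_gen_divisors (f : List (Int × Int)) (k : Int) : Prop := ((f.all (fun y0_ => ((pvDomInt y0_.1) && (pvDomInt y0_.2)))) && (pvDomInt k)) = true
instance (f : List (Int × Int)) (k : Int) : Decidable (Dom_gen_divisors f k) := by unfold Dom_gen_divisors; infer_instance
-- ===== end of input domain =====

-- B replaces A's nested-generator recursion by an iterative product accumulator folded
-- over the factor indices in reverse (objective: alternative decomposition, same cost).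

-- ===== PORT A =====
-- A is a generator; its port returns the list of yielded pairs in yield order.
def gen_divisors (f : List (Int × Int)) (k : Int) : List (Int × Int) :=
  if k = (f.length : Int) then [(1, 1)]
  else
    match h : PySem.List.pyGet? f k with
    | none => []  -- f[k] raises IndexError in Python; such inputs are outside Pre_
    | some pe =>
        (gen_divisors f (k + 1)).flatMap (fun d =>
          (PySem.List.pyRange 0 (pe.2 + 1) 1).map (fun e =>
            (d.1 * pe.1 ^ e.toNat, d.2 * pe.1 ^ (pe.2 - e).toNat)))
  termination_by ((f.length : Int) + 1 - k).toNat
  decreasing_by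
    have hin : PySem.Raise.InRange f.length k := by
      by_contra hn
      rw [(PySem.List.pyGet?_eq_none_iff f k).mpr hn] at h
      simp at h
    simp [PySem.Raise.InRange] at hin
    omega

-- ===== PORT B =====
def gen_divisors_alt (f : List (Int × Int)) (k : Int) : List (Int × Int) :=
  (PySem.List.pyRange ((f.length : Int) - 1) (k - 1) (-1)).foldl
    (fun acc i =>
      match PySem.List.pyGet? f i with
      | none => []  -- f[i] raises IndexError in Python; such inputs are outside Pre_
      | some pe =>
          acc.flatMap (fun d =>
            (PySem.List.pyRange 0 (pe.2 + 1) 1).map (fun e =>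
              (d.1 * pe.1 ^ e.toNat, d.2 * pe.1 ^ (pe.2 - e).toNat))))
    [(1, 1)]

-- ===== PRECONDITION & SPEC =====
-- Pre_ excludes exactly the inputs where Python A raises IndexError: k > len(f) or k < -len(f).
def Pre_gen_divisors (f : List (Int × Int)) (k : Int) : Prop :=
  -((f.length : Int)) ≤ k ∧ k ≤ (f.length : Int)
instance (f : List (Int × Int)) (k : Int) : Decidable (Pre_gen_divisors f k) := by unfold Pre_gen_divisors; infer_instance
def pvWitness_gen_divisors : (List (Int × Int)) × Int := ([(2, 2), (3, 1)], 0)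

def Spec_gen_divisors (f : List (Int × Int)) (k : Int) (out : List (Int × Int)) : Prop := out = gen_divisors_alt f k
instance (f : List (Int × Int)) (k : Int) (out : List (Int × Int)) : Decidable (Spec_gen_divisors f k out) := by unfold Spec_gen_divisors; infer_instance

-- ===== CLAIM (what is proved, stated in full; the proofs are below) =====
def Claim_equal_gen_divisors : Prop := ∀ (f : List (Int × Int)) (k : Int), Dom_gen_divisors f k → Pre_gen_divisors f k → Spec_gen_divisors f k (gen_divisors f k)

-- ===== LEMMAS AND PROOFS =====

-- a countdown range extends on the right by its stop bound
theorem pyRange_neg_one_snoc (a m : Int) (h : m ≤ a) :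
    PySem.List.pyRange a (m - 1) (-1) = PySem.List.pyRange a m (-1) ++ [m] := by
  rw [PySem.List.pyRange_neg_one_eq_reverse, PySem.List.pyRange_neg_one_eq_reverse]
  have : m - 1 + 1 = m := by omega
  rw [this]
  rw [PySem.List.pyRange_one_cons (by omega : m < a + 1)]
  simp

theorem gen_divisors_eq_alt (f : List (Int × Int)) (k : Int)
    (h1 : -((f.length : Int)) ≤ k) (h2 : k ≤ (f.length : Int)) :
    gen_divisors f k = gen_divisors_alt f k := by
  rcases eq_or_lt_of_le h2 with heq | hlt
  · unfold gen_divisors gen_divisors_alt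
    rw [if_pos heq, heq, PySem.List.pyRange_neg_one_eq_nil (by omega)]
    simp
  · have hne : k ≠ (f.length : Int) := ne_of_lt hlt
    have hin : PySem.Raise.InRange f.length k := by
      simp [PySem.Raise.InRange]; omega
    obtain ⟨pe, hpe⟩ : ∃ pe, PySem.List.pyGet? f k = some pe := by
      cases hget : PySem.List.pyGet? f k with
      | none => exact absurd hin ((PySem.List.pyGet?_eq_none_iff f k).mp hget)
      | some pe => exact ⟨pe, rfl⟩
    have IH := gen_divisors_eq_alt f (k + 1) (by omega) (by omega)
    have hk1 : k + 1 - 1 = k := by omega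
    unfold gen_divisors
    rw [if_neg hne, hpe]
    unfold gen_divisors_alt
    rw [pyRange_neg_one_snoc ((f.length : Int) - 1) k (by omega), List.foldl_append]
    unfold gen_divisors_alt at IH
    rw [hk1] at IH
    rw [← IH]
    simp [hpe]
  termination_by ((f.length : Int) - k).toNat
  decreasing_by omega

-- ===== VERDICT (by name: the statement is the Claim_ definition above) =====
theorem gen_divisors_spec : Claim_equal_gen_divisors := by
  intro f k _ hpre
  unfold Spec_gen_divisors
  exact gen_divisors_eq_alt f k hpre.1 hpre.2
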